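-- pv_equiv track=rewrite | github.com/JeanNaima/DermAssist | server-deploy/py-api/test_simple.py | csv_diagnosis
-- ===== SOURCE A (Python) =====
-- def csv_diagnosis(csv_data, image_name):
--     for row in csv_data:
--         if row[0] in image_name:
--             diagnosis = row[9].lower()
--
--             if "melanocytic nevi" in diagnosis or "nevus" in diagnosis:
--                 return "nv (melanocytic nevi, nevus)"
--             elif "melanoma" in diagnosis:
--                 return "mel (melanoma)"
--             elif (
--                 "benign keratosis" in diagnosis
--                 or "solar lentigo" in diagnosis
--                 or "seborrheic keratosis" in diagnosis
--                 or "lichen planus-like keratosis" in diagnosis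
--             ):
--                 return "bkl (benign keratosis, solar lentigo, seborrheic keratosis, lichen planus-like keratosis)"
--             elif "basal cell carcinoma" in diagnosis:
--                 return "bcc (basal cell carcinoma)"
--             elif "actinic keratoses" in diagnosis:
--                 return "akiec (actinic keratoses)"
--             elif "vasc" in diagnosis:
--                 return "vasc (vascular lesions)"
--             elif "dermatofibroma" in diagnosis:
--                 return "df (dermatofibroma)"
--             elif "scar" in diagnosis:
--                 return "scr (scar)"
--             else:
--                 return "Not Classified"
--     return "Not Classified"
-- ===== SOURCE B (Python) =====
-- # B: instead of an ordered if/elif cascade, classify by computing the MINIMUM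
-- # category priority over a flat, alphabetically ordered keyword table (the result
-- # is order-independent), then index into the codes array; the matching row is
-- # found with next() over a generator.
--
-- _CODES = [
--     "nv (melanocytic nevi, nevus)",
--     "mel (melanoma)",
--     "bkl (benign keratosis, solar lentigo, seborrheic keratosis, lichen planus-like keratosis)",
--     "bcc (basal cell carcinoma)",
--     "akiec (actinic keratoses)",
--     "vasc (vascular lesions)",
--     "df (dermatofibroma)",
--     "scr (scar)",
--     "Not Classified",
-- ]
--
-- _KEYWORDS = [  # alphabetical; order is irrelevant because we take a minimum
--     ("actinic keratoses", 4),
--     ("basal cell carcinoma", 3),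
--     ("benign keratosis", 2),
--     ("dermatofibroma", 6),
--     ("lichen planus-like keratosis", 2),
--     ("melanocytic nevi", 0),
--     ("melanoma", 1),
--     ("nevus", 0),
--     ("scar", 7),
--     ("seborrheic keratosis", 2),
--     ("solar lentigo", 2),
--     ("vasc", 5),
-- ]
--
--
-- def csv_diagnosis(csv_data, image_name):
--     row = next((r for r in csv_data if r[0] in image_name), None)
--     if row is None:
--         return "Not Classified"
--     diagnosis = row[9].lower()
--     best = len(_CODES) - 1
--     for kw, pri in _KEYWORDS:
--         if pri < best and kw in diagnosis:
--             best = pri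
--     return _CODES[best]
-- ===== Notes on version B (the rewrite author's own statement) =====
-- stated objective: alternative
-- what changed: Replaces the ordered eight-branch if/elif substring cascade by an order-independent minimum: a single pass over a flat alphabetical (keyword, priority) table accumulating the least priority whose keyword occurs in the diagnosis, then indexing a codes array; the matching row is found with next() over a generator instead of a loop with embedded returns.
import Mathlib
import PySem

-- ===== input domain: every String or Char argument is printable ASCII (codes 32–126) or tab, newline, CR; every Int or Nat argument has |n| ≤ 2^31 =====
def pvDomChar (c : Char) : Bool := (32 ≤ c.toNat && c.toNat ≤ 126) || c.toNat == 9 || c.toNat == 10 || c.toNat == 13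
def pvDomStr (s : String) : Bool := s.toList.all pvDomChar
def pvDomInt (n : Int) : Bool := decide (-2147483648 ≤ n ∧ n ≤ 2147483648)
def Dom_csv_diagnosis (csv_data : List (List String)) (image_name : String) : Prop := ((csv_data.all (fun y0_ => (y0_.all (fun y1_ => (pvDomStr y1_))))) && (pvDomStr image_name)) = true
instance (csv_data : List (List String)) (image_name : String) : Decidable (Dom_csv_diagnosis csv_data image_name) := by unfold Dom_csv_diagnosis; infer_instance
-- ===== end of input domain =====

-- B replaces A's ordered if/elif cascade by an order-independent minimum-priority pass
-- over a flat alphabetical keyword table plus a codes array (alternative decomposition).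


-- ===== PORT A =====
-- literal transliteration of A: loop over rows, substring test row[0] in image_name,
-- then the if/elif cascade on row[9].lower(); pyGet?/getD "" totalises the index reads
-- that Python would raise on (those inputs are outside Pre_).
def csv_diagnosis (csv_data : List (List String)) (image_name : String) : String :=
  match csv_data with
  | [] => "Not Classified"
  | row :: rest =>
    if PySem.Str.isIn ((PySem.List.pyGet? row 0).getD "") image_name then
      let diagnosis := PySem.Str.lower ((PySem.List.pyGet? row 9).getD "")
      if PySem.Str.isIn "melanocytic nevi" diagnosis || PySem.Str.isIn "nevus" diagnosis then
        "nv (melanocytic nevi, nevus)"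
      else if PySem.Str.isIn "melanoma" diagnosis then
        "mel (melanoma)"
      else if PySem.Str.isIn "benign keratosis" diagnosis
           || PySem.Str.isIn "solar lentigo" diagnosis
           || PySem.Str.isIn "seborrheic keratosis" diagnosis
           || PySem.Str.isIn "lichen planus-like keratosis" diagnosis then
        "bkl (benign keratosis, solar lentigo, seborrheic keratosis, lichen planus-like keratosis)"
      else if PySem.Str.isIn "basal cell carcinoma" diagnosis then
        "bcc (basal cell carcinoma)"
      else if PySem.Str.isIn "actinic keratoses" diagnosis then
        "akiec (actinic keratoses)"
      else if PySem.Str.isIn "vasc" diagnosis then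
        "vasc (vascular lesions)"
      else if PySem.Str.isIn "dermatofibroma" diagnosis then
        "df (dermatofibroma)"
      else if PySem.Str.isIn "scar" diagnosis then
        "scr (scar)"
      else
        "Not Classified"
    else csv_diagnosis rest image_name

-- ===== PORT B =====
-- Source B's _CODES array (index = category priority; last entry = no match)
def pvCodes : List String :=
  [ "nv (melanocytic nevi, nevus)",
    "mel (melanoma)",
    "bkl (benign keratosis, solar lentigo, seborrheic keratosis, lichen planus-like keratosis)",
    "bcc (basal cell carcinoma)",
    "akiec (actinic keratoses)",
    "vasc (vascular lesions)",
    "df (dermatofibroma)",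
    "scr (scar)",
    "Not Classified" ]

-- Source B's _KEYWORDS: flat alphabetical (keyword, priority) table
def pvKeywords : List (String × Nat) :=
  [ ("actinic keratoses", 4),
    ("basal cell carcinoma", 3),
    ("benign keratosis", 2),
    ("dermatofibroma", 6),
    ("lichen planus-like keratosis", 2),
    ("melanocytic nevi", 0),
    ("melanoma", 1),
    ("nevus", 0),
    ("scar", 7),
    ("seborrheic keratosis", 2),
    ("solar lentigo", 2),
    ("vasc", 5) ]

-- Source B's accumulator loop: best = 8; for kw, pri in _KEYWORDS: if pri < best and kw in diagnosis: best = pri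
def pvBest (diagnosis : String) : Nat :=
  pvKeywords.foldl
    (fun b kp => if decide (kp.2 < b) && PySem.Str.isIn kp.1 diagnosis then kp.2 else b) 8

def csv_diagnosis_alt (csv_data : List (List String)) (image_name : String) : String :=
  match csv_data.find? (fun r => PySem.Str.isIn ((PySem.List.pyGet? r 0).getD "") image_name) with
  | some row =>
    -- _CODES[best]: best ≤ 8 always, so plain getD is exact here
    pvCodes.getD (pvBest (PySem.Str.lower ((PySem.List.pyGet? row 9).getD ""))) "Not Classified"
  | none => "Not Classified"

-- ===== PRECONDITION & SPEC =====
-- Pre_ excludes exactly the inputs where Python A raises IndexError: an empty row reached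
-- before (or as) the first matching row, or a first matching row shorter than 10 fields.
def pvPreOk : List (List String) → String → Bool
  | [], _ => true
  | row :: rest, image_name =>
    decide (row ≠ []) &&
      (if PySem.Str.isIn ((PySem.List.pyGet? row 0).getD "") image_name
       then decide (10 ≤ row.length)
       else pvPreOk rest image_name)

def Pre_csv_diagnosis (csv_data : List (List String)) (image_name : String) : Prop :=
  pvPreOk csv_data image_name = true
instance (csv_data : List (List String)) (image_name : String) : Decidable (Pre_csv_diagnosis csv_data image_name) := by unfold Pre_csv_diagnosis; infer_instance

def pvWitness_csv_diagnosis : List (List String) × String :=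
  ([["img", "a", "a", "a", "a", "a", "a", "a", "a", "Melanoma"]], "img1")

def Spec_csv_diagnosis (csv_data : List (List String)) (image_name : String) (out : String) : Prop := out = csv_diagnosis_alt csv_data image_name
instance (csv_data : List (List String)) (image_name : String) (out : String) : Decidable (Spec_csv_diagnosis csv_data image_name out) := by unfold Spec_csv_diagnosis; infer_instance

-- ===== CLAIM (what is proved, stated in full; the proofs are below) =====
def Claim_equal_csv_diagnosis : Prop := ∀ (csv_data : List (List String)) (image_name : String), Dom_csv_diagnosis csv_data image_name → Pre_csv_diagnosis csv_data image_name → Spec_csv_diagnosis csv_data image_name (csv_diagnosis csv_data image_name)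

-- ===== LEMMAS AND PROOFS =====

-- generic properties of Source B's min-accumulator loop (step: if pri < b and hit: b := pri)

theorem pvFold_le (h : String → Bool) (l : List (String × Nat)) :
    ∀ b : Nat, List.foldl (fun b kp => if decide (kp.2 < b) && h kp.1 then kp.2 else b) b l ≤ b := by
  induction l with
  | nil => intro b; simp
  | cons kp l ih =>
    intro b
    rw [List.foldl_cons]
    refine le_trans (ih _) ?_
    split
    · rename_i hc
      simp only [Bool.and_eq_true, decide_eq_true_eq] at hc
      omega
    · exact le_refl b

theorem pvFold_lb (h : String → Bool) (l : List (String × Nat)) (j : Nat)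
    (hall : ∀ kp ∈ l, h kp.1 = true → j ≤ kp.2) :
    ∀ b : Nat, j ≤ b →
      j ≤ List.foldl (fun b kp => if decide (kp.2 < b) && h kp.1 then kp.2 else b) b l := by
  induction l with
  | nil => intro b hb; simpa
  | cons kp l ih =>
    intro b hb
    rw [List.foldl_cons]
    refine ih (fun q hq => hall q (List.mem_cons_of_mem _ hq)) _ ?_
    split
    · rename_i hc
      simp only [Bool.and_eq_true, decide_eq_true_eq] at hc
      exact hall kp List.mem_cons_self hc.2
    · exact hb

theorem pvFold_ub (h : String → Bool) (l : List (String × Nat)) (kp0 : String × Nat)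
    (hmem : kp0 ∈ l) (hhit : h kp0.1 = true) :
    ∀ b : Nat, List.foldl (fun b kp => if decide (kp.2 < b) && h kp.1 then kp.2 else b) b l ≤ kp0.2 := by
  induction l with
  | nil => cases hmem
  | cons kp l ih =>
    intro b
    rw [List.foldl_cons]
    rcases List.mem_cons.mp hmem with rfl | hmem'
    · have hstep : (if decide (kp0.2 < b) && h kp0.1 then kp0.2 else b)
          = if kp0.2 < b then kp0.2 else b := by simp [hhit]
      rw [hstep]
      by_cases hlt : kp0.2 < b
      · simp only [hlt, if_pos]
        exact pvFold_le h l kp0.2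
      · simp only [hlt, if_neg, not_false_iff]
        exact le_trans (pvFold_le h l b) (by omega)
    · exact ih hmem' _

-- pvBest d is exactly the least priority whose keyword occurs in d (8 if none does)
theorem pvBest_eq (d : String) (kp0 : String × Nat) (hmem : kp0 ∈ pvKeywords)
    (hhit : PySem.Str.isIn kp0.1 d = true) (hj : kp0.2 ≤ 8)
    (hall : ∀ kp ∈ pvKeywords, PySem.Str.isIn kp.1 d = true → kp0.2 ≤ kp.2) :
    pvBest d = kp0.2 := by
  unfold pvBest
  exact le_antisymm (pvFold_ub (fun s => PySem.Str.isIn s d) pvKeywords kp0 hmem hhit 8)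
    (pvFold_lb (fun s => PySem.Str.isIn s d) pvKeywords kp0.2 hall 8 hj)

theorem pvBest_none (d : String)
    (hall : ∀ kp ∈ pvKeywords, PySem.Str.isIn kp.1 d = false) :
    pvBest d = 8 := by
  unfold pvBest
  exact le_antisymm (pvFold_le (fun s => PySem.Str.isIn s d) pvKeywords 8)
    (pvFold_lb (fun s => PySem.Str.isIn s d) pvKeywords 8
      (fun kp hm hh => by
        have hh' : PySem.Str.isIn kp.1 d = true := hh
        rw [hall kp hm] at hh'; simp at hh') 8 (le_refl 8))

-- keywords of priority below 1 are absent, so every present keyword has priority ≥ 1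
theorem pvHall1 (d : String)
    (hMN : PySem.Str.isIn "melanocytic nevi" d = false)
    (hNev : PySem.Str.isIn "nevus" d = false)
    : ∀ kp ∈ pvKeywords, PySem.Str.isIn kp.1 d = true → 1 ≤ kp.2 := by
  intro kp hm hh
  simp only [pvKeywords, List.mem_cons, List.not_mem_nil, or_false] at hm
  rcases hm with rfl|rfl|rfl|rfl|rfl|rfl|rfl|rfl|rfl|rfl|rfl|rfl <;>
    first | omega | simp_all

-- keywords of priority below 2 are absent, so every present keyword has priority ≥ 2
theorem pvHall2 (d : String)
    (hMN : PySem.Str.isIn "melanocytic nevi" d = false)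
    (hMel : PySem.Str.isIn "melanoma" d = false)
    (hNev : PySem.Str.isIn "nevus" d = false)
    : ∀ kp ∈ pvKeywords, PySem.Str.isIn kp.1 d = true → 2 ≤ kp.2 := by
  intro kp hm hh
  simp only [pvKeywords, List.mem_cons, List.not_mem_nil, or_false] at hm
  rcases hm with rfl|rfl|rfl|rfl|rfl|rfl|rfl|rfl|rfl|rfl|rfl|rfl <;>
    first | omega | simp_all

-- keywords of priority below 3 are absent, so every present keyword has priority ≥ 3
theorem pvHall3 (d : String)
    (hBK : PySem.Str.isIn "benign keratosis" d = false)
    (hLPK : PySem.Str.isIn "lichen planus-like keratosis" d = false)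
    (hMN : PySem.Str.isIn "melanocytic nevi" d = false)
    (hMel : PySem.Str.isIn "melanoma" d = false)
    (hNev : PySem.Str.isIn "nevus" d = false)
    (hSeb : PySem.Str.isIn "seborrheic keratosis" d = false)
    (hSL : PySem.Str.isIn "solar lentigo" d = false)
    : ∀ kp ∈ pvKeywords, PySem.Str.isIn kp.1 d = true → 3 ≤ kp.2 := by
  intro kp hm hh
  simp only [pvKeywords, List.mem_cons, List.not_mem_nil, or_false] at hm
  rcases hm with rfl|rfl|rfl|rfl|rfl|rfl|rfl|rfl|rfl|rfl|rfl|rfl <;>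
    first | omega | simp_all

-- keywords of priority below 4 are absent, so every present keyword has priority ≥ 4
theorem pvHall4 (d : String)
    (hBCC : PySem.Str.isIn "basal cell carcinoma" d = false)
    (hBK : PySem.Str.isIn "benign keratosis" d = false)
    (hLPK : PySem.Str.isIn "lichen planus-like keratosis" d = false)
    (hMN : PySem.Str.isIn "melanocytic nevi" d = false)
    (hMel : PySem.Str.isIn "melanoma" d = false)
    (hNev : PySem.Str.isIn "nevus" d = false)
    (hSeb : PySem.Str.isIn "seborrheic keratosis" d = false)
    (hSL : PySem.Str.isIn "solar lentigo" d = false)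
    : ∀ kp ∈ pvKeywords, PySem.Str.isIn kp.1 d = true → 4 ≤ kp.2 := by
  intro kp hm hh
  simp only [pvKeywords, List.mem_cons, List.not_mem_nil, or_false] at hm
  rcases hm with rfl|rfl|rfl|rfl|rfl|rfl|rfl|rfl|rfl|rfl|rfl|rfl <;>
    first | omega | simp_all

-- keywords of priority below 5 are absent, so every present keyword has priority ≥ 5
theorem pvHall5 (d : String)
    (hAK : PySem.Str.isIn "actinic keratoses" d = false)
    (hBCC : PySem.Str.isIn "basal cell carcinoma" d = false)
    (hBK : PySem.Str.isIn "benign keratosis" d = false)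
    (hLPK : PySem.Str.isIn "lichen planus-like keratosis" d = false)
    (hMN : PySem.Str.isIn "melanocytic nevi" d = false)
    (hMel : PySem.Str.isIn "melanoma" d = false)
    (hNev : PySem.Str.isIn "nevus" d = false)
    (hSeb : PySem.Str.isIn "seborrheic keratosis" d = false)
    (hSL : PySem.Str.isIn "solar lentigo" d = false)
    : ∀ kp ∈ pvKeywords, PySem.Str.isIn kp.1 d = true → 5 ≤ kp.2 := by
  intro kp hm hh
  simp only [pvKeywords, List.mem_cons, List.not_mem_nil, or_false] at hm
  rcases hm with rfl|rfl|rfl|rfl|rfl|rfl|rfl|rfl|rfl|rfl|rfl|rfl <;>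
    first | omega | simp_all

-- keywords of priority below 6 are absent, so every present keyword has priority ≥ 6
theorem pvHall6 (d : String)
    (hAK : PySem.Str.isIn "actinic keratoses" d = false)
    (hBCC : PySem.Str.isIn "basal cell carcinoma" d = false)
    (hBK : PySem.Str.isIn "benign keratosis" d = false)
    (hLPK : PySem.Str.isIn "lichen planus-like keratosis" d = false)
    (hMN : PySem.Str.isIn "melanocytic nevi" d = false)
    (hMel : PySem.Str.isIn "melanoma" d = false)
    (hNev : PySem.Str.isIn "nevus" d = false)
    (hSeb : PySem.Str.isIn "seborrheic keratosis" d = false)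
    (hSL : PySem.Str.isIn "solar lentigo" d = false)
    (hV : PySem.Str.isIn "vasc" d = false)
    : ∀ kp ∈ pvKeywords, PySem.Str.isIn kp.1 d = true → 6 ≤ kp.2 := by
  intro kp hm hh
  simp only [pvKeywords, List.mem_cons, List.not_mem_nil, or_false] at hm
  rcases hm with rfl|rfl|rfl|rfl|rfl|rfl|rfl|rfl|rfl|rfl|rfl|rfl <;>
    first | omega | simp_all

-- keywords of priority below 7 are absent, so every present keyword has priority ≥ 7
theorem pvHall7 (d : String)
    (hAK : PySem.Str.isIn "actinic keratoses" d = false)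
    (hBCC : PySem.Str.isIn "basal cell carcinoma" d = false)
    (hBK : PySem.Str.isIn "benign keratosis" d = false)
    (hDF : PySem.Str.isIn "dermatofibroma" d = false)
    (hLPK : PySem.Str.isIn "lichen planus-like keratosis" d = false)
    (hMN : PySem.Str.isIn "melanocytic nevi" d = false)
    (hMel : PySem.Str.isIn "melanoma" d = false)
    (hNev : PySem.Str.isIn "nevus" d = false)
    (hSeb : PySem.Str.isIn "seborrheic keratosis" d = false)
    (hSL : PySem.Str.isIn "solar lentigo" d = false)
    (hV : PySem.Str.isIn "vasc" d = false)
    : ∀ kp ∈ pvKeywords, PySem.Str.isIn kp.1 d = true → 7 ≤ kp.2 := by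
  intro kp hm hh
  simp only [pvKeywords, List.mem_cons, List.not_mem_nil, or_false] at hm
  rcases hm with rfl|rfl|rfl|rfl|rfl|rfl|rfl|rfl|rfl|rfl|rfl|rfl <;>
    first | omega | simp_all

theorem pvHallNone (d : String)
    (hAK : PySem.Str.isIn "actinic keratoses" d = false)
    (hBCC : PySem.Str.isIn "basal cell carcinoma" d = false)
    (hBK : PySem.Str.isIn "benign keratosis" d = false)
    (hDF : PySem.Str.isIn "dermatofibroma" d = false)
    (hLPK : PySem.Str.isIn "lichen planus-like keratosis" d = false)
    (hMN : PySem.Str.isIn "melanocytic nevi" d = false)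
    (hMel : PySem.Str.isIn "melanoma" d = false)
    (hNev : PySem.Str.isIn "nevus" d = false)
    (hSc : PySem.Str.isIn "scar" d = false)
    (hSeb : PySem.Str.isIn "seborrheic keratosis" d = false)
    (hSL : PySem.Str.isIn "solar lentigo" d = false)
    (hV : PySem.Str.isIn "vasc" d = false)
    : ∀ kp ∈ pvKeywords, PySem.Str.isIn kp.1 d = false := by
  intro kp hm
  simp only [pvKeywords, List.mem_cons, List.not_mem_nil, or_false] at hm
  rcases hm with rfl|rfl|rfl|rfl|rfl|rfl|rfl|rfl|rfl|rfl|rfl|rfl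
  · exact hAK
  · exact hBCC
  · exact hBK
  · exact hDF
  · exact hLPK
  · exact hMN
  · exact hMel
  · exact hNev
  · exact hSc
  · exact hSeb
  · exact hSL
  · exact hV

set_option maxHeartbeats 1000000 in
-- A's if/elif cascade computes B's min-priority code lookup
theorem pvCascade_eq (d : String) :
    (if PySem.Str.isIn "melanocytic nevi" d || PySem.Str.isIn "nevus" d then
        "nv (melanocytic nevi, nevus)"
      else if PySem.Str.isIn "melanoma" d then
        "mel (melanoma)"
      else if PySem.Str.isIn "benign keratosis" d
           || PySem.Str.isIn "solar lentigo" d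
           || PySem.Str.isIn "seborrheic keratosis" d
           || PySem.Str.isIn "lichen planus-like keratosis" d then
        "bkl (benign keratosis, solar lentigo, seborrheic keratosis, lichen planus-like keratosis)"
      else if PySem.Str.isIn "basal cell carcinoma" d then
        "bcc (basal cell carcinoma)"
      else if PySem.Str.isIn "actinic keratoses" d then
        "akiec (actinic keratoses)"
      else if PySem.Str.isIn "vasc" d then
        "vasc (vascular lesions)"
      else if PySem.Str.isIn "dermatofibroma" d then
        "df (dermatofibroma)"
      else if PySem.Str.isIn "scar" d then
        "scr (scar)"
      else
        "Not Classified") = pvCodes.getD (pvBest d) "Not Classified" := by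
  by_cases h1 : (PySem.Str.isIn "melanocytic nevi" d || PySem.Str.isIn "nevus" d) = true
  · rw [if_pos h1]
    simp only [Bool.or_eq_true] at h1
    rcases h1 with hh | hh
    · rw [pvBest_eq d ("melanocytic nevi", 0) (by simp [pvKeywords]) hh (by omega)
        (fun kp _ _ => Nat.zero_le _)]
      rfl
    · rw [pvBest_eq d ("nevus", 0) (by simp [pvKeywords]) hh (by omega)
        (fun kp _ _ => Nat.zero_le _)]
      rfl
  rw [if_neg h1]
  simp only [Bool.or_eq_true, not_or, Bool.not_eq_true] at h1
  obtain ⟨hMN, hNev⟩ := h1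
  by_cases h2 : PySem.Str.isIn "melanoma" d = true
  · rw [if_pos h2, pvBest_eq d ("melanoma", 1) (by simp [pvKeywords]) h2 (by omega)
      (pvHall1 d hMN hNev)]
    rfl
  rw [if_neg h2]
  simp only [Bool.not_eq_true] at h2
  by_cases h3 : (PySem.Str.isIn "benign keratosis" d || PySem.Str.isIn "solar lentigo" d
      || PySem.Str.isIn "seborrheic keratosis" d || PySem.Str.isIn "lichen planus-like keratosis" d) = true
  · rw [if_pos h3]
    have hall := pvHall2 d hMN h2 hNev
    simp only [Bool.or_eq_true] at h3
    rcases h3 with ((hh | hh) | hh) | hh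
    · rw [pvBest_eq d ("benign keratosis", 2) (by simp [pvKeywords]) hh (by omega) hall]; rfl
    · rw [pvBest_eq d ("solar lentigo", 2) (by simp [pvKeywords]) hh (by omega) hall]; rfl
    · rw [pvBest_eq d ("seborrheic keratosis", 2) (by simp [pvKeywords]) hh (by omega) hall]; rfl
    · rw [pvBest_eq d ("lichen planus-like keratosis", 2) (by simp [pvKeywords]) hh (by omega) hall]; rfl
  rw [if_neg h3]
  simp only [Bool.or_eq_true, not_or, Bool.not_eq_true] at h3
  obtain ⟨⟨⟨hBK, hSL⟩, hSeb⟩, hLPK⟩ := h3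
  by_cases h4 : PySem.Str.isIn "basal cell carcinoma" d = true
  · rw [if_pos h4, pvBest_eq d ("basal cell carcinoma", 3) (by simp [pvKeywords]) h4 (by omega)
      (pvHall3 d hBK hLPK hMN h2 hNev hSeb hSL)]
    rfl
  rw [if_neg h4]
  simp only [Bool.not_eq_true] at h4
  by_cases h5 : PySem.Str.isIn "actinic keratoses" d = true
  · rw [if_pos h5, pvBest_eq d ("actinic keratoses", 4) (by simp [pvKeywords]) h5 (by omega)
      (pvHall4 d h4 hBK hLPK hMN h2 hNev hSeb hSL)]
    rfl
  rw [if_neg h5]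
  simp only [Bool.not_eq_true] at h5
  by_cases h6 : PySem.Str.isIn "vasc" d = true
  · rw [if_pos h6, pvBest_eq d ("vasc", 5) (by simp [pvKeywords]) h6 (by omega)
      (pvHall5 d h5 h4 hBK hLPK hMN h2 hNev hSeb hSL)]
    rfl
  rw [if_neg h6]
  simp only [Bool.not_eq_true] at h6
  by_cases h7 : PySem.Str.isIn "dermatofibroma" d = true
  · rw [if_pos h7, pvBest_eq d ("dermatofibroma", 6) (by simp [pvKeywords]) h7 (by omega)
      (pvHall6 d h5 h4 hBK hLPK hMN h2 hNev hSeb hSL h6)]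
    rfl
  rw [if_neg h7]
  simp only [Bool.not_eq_true] at h7
  by_cases h8 : PySem.Str.isIn "scar" d = true
  · rw [if_pos h8, pvBest_eq d ("scar", 7) (by simp [pvKeywords]) h8 (by omega)
      (pvHall7 d h5 h4 hBK h7 hLPK hMN h2 hNev hSeb hSL h6)]
    rfl
  rw [if_neg h8]
  simp only [Bool.not_eq_true] at h8
  rw [pvBest_none d (pvHallNone d h5 h4 hBK h7 hLPK hMN h2 hNev h8 hSeb hSL h6)]
  rfl

theorem pv_eq (csv_data : List (List String)) (image_name : String) :
    csv_diagnosis csv_data image_name = csv_diagnosis_alt csv_data image_name := by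
  induction csv_data with
  | nil => rfl
  | cons row rest ih =>
    by_cases h : PySem.Str.isIn ((PySem.List.pyGet? row 0).getD "") image_name = true
    · simp only [csv_diagnosis, csv_diagnosis_alt, List.find?, h, if_pos]
      exact pvCascade_eq _
    · simp only [Bool.not_eq_true] at h
      simp only [csv_diagnosis, csv_diagnosis_alt, List.find?, h, Bool.false_eq_true,
        if_false] at ih ⊢
      exact ih

-- ===== VERDICT (by name: the statement is the Claim_ definition above) =====
theorem csv_diagnosis_spec : Claim_equal_csv_diagnosis := by
  intro csv_data image_name _ _
  unfold Spec_csv_diagnosis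
  exact pv_eq csv_data image_name
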